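-- pv_equiv track=rewrite | github.com/davidAlvarez24913/exercices_devsucodejam | exercise_15_2011.py | exercise_15
-- ===== SOURCE A (Python) =====
-- def exercise_15(my_array):
--     result =[]
--     for x in range(1,len(my_array)):
--         out = sum(my_array[x:])
--         out2 = sum(my_array[:-x])
--         result.append([out, my_array[x:]])
--         result.append([out2, my_array[:-x]])
--
--     return max(result)[1]
-- ===== SOURCE B (Python) =====
-- def exercise_15(my_array):
--     n = len(my_array)
--     pre = [0]
--     for v in my_array:
--         pre.append(pre[-1] + v)
--     total = pre[n]
--     best = None  # (sum, start, stop) describing my_array[start:stop]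
--     for x in range(1, n):
--         for cand in ((total - pre[x], x, n), (pre[n - x], 0, n - x)):
--             if best is None:
--                 best = cand
--             else:
--                 s, a, b = cand
--                 bs, ba, bb = best
--                 if s > bs or (s == bs and my_array[ba:bb] < my_array[a:b]):
--                     best = cand
--     s, a, b = best
--     return my_array[a:b]
-- ===== Notes on version B (the rewrite author's own statement) =====
-- stated objective: faster
-- what changed: B replaces A's per-index O(n) re-summation and eager materialisation of all 2(n-1) [sum, slice] candidate lists with one prefix-sum pass and an incrementally tracked best candidate stored as (sum, start, stop); slices are materialised only on sum ties and once for the winner.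
-- outside the precondition, e.g. on exercise_15([]): A raises ValueError, B raises TypeError
import Mathlib
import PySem

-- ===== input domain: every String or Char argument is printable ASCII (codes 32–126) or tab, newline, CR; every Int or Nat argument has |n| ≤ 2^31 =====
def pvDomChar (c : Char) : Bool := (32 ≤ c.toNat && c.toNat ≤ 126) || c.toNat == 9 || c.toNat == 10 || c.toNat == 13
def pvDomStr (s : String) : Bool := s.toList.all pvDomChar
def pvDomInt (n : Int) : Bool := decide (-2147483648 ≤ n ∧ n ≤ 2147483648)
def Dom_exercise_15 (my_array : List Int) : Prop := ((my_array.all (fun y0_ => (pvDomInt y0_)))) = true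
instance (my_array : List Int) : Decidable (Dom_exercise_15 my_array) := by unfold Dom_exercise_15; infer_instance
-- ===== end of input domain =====

-- B avoids A's repeated O(n) summations/slicings: one prefix-sum pass, incremental best by (sum,start,stop), winner sliced once.

-- Python lexicographic '<' on lists of ints
def pyListLt : List Int → List Int → Bool
  | _, [] => false
  | [], _ :: _ => true
  | a :: as, b :: bs => if a < b then true else if b < a then false else pyListLt as bs

-- ===== PORT A =====
-- Python max picks a new item iff current < item (first maximum wins)
def pvPickMax (cur p : Int × List Int) : Int × List Int :=
  if cur.1 < p.1 || (cur.1 == p.1 && pyListLt cur.2 p.2) then p else cur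

def exercise_15 (my_array : List Int) : List Int :=
  let result := (PySem.List.pyRange 1 (my_array.length : Int) 1).foldl (fun acc x =>
      let suf := PySem.List.slice my_array (some x) none       -- my_array[x:]
      let pref := PySem.List.slice my_array none (some (-x))   -- my_array[:-x]
      acc ++ [(suf.sum, suf), (pref.sum, pref)]) []
  match result with
  | [] => []   -- Python: max([]) raises ValueError; excluded by Pre_
  | h :: t => (t.foldl pvPickMax h).2

-- ===== PORT B =====
-- best-candidate update: compare by sum, on ties by the described slices (Python list '<')
def pvStep (arr : List Int) (best : Option (Int × Int × Int)) (cand : Int × Int × Int) :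
    Option (Int × Int × Int) :=
  match best with
  | none => some cand
  | some b =>
    if b.1 < cand.1 || (cand.1 == b.1 &&
        pyListLt (PySem.List.slice arr (some b.2.1) (some b.2.2))
                 (PySem.List.slice arr (some cand.2.1) (some cand.2.2))) then
      some cand
    else best

def exercise_15_alt (my_array : List Int) : List Int :=
  let n : Int := my_array.length
  let pre := my_array.foldl (fun acc v => acc ++ [acc.getLast! + v]) [0]
  let total := PySem.List.pyGetD pre n 0
  let best := (PySem.List.pyRange 1 n 1).foldl (fun best x =>
      pvStep my_array (pvStep my_array best (total - PySem.List.pyGetD pre x 0, x, n))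
        (PySem.List.pyGetD pre (n - x) 0, 0, n - x)) none
  match best with
  | none => []   -- Python: unpacking best = None raises TypeError; excluded by Pre_
  | some b => PySem.List.slice my_array (some b.2.1) (some b.2.2)

-- ===== PRECONDITION & SPEC =====
-- On lists of length < 2 both Pythons raise (A: ValueError from max([]), B: TypeError); excluded.
def Pre_exercise_15 (my_array : List Int) : Prop := 2 ≤ my_array.length
instance (my_array : List Int) : Decidable (Pre_exercise_15 my_array) := by
  unfold Pre_exercise_15; infer_instance
def pvWitness_exercise_15 : List Int := [1, 2]

def Spec_exercise_15 (my_array : List Int) (out : List Int) : Prop := out = exercise_15_alt my_array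
instance (my_array : List Int) (out : List Int) : Decidable (Spec_exercise_15 my_array out) := by unfold Spec_exercise_15; infer_instance

-- ===== CLAIM (what is proved, stated in full; the proofs are below) =====
def Claim_equal_exercise_15 : Prop := ∀ (my_array : List Int), Dom_exercise_15 my_array → Pre_exercise_15 my_array → Spec_exercise_15 my_array (exercise_15 my_array)

-- ===== LEMMAS AND PROOFS =====

-- A-side max as an Option-fold
def pvStepA (o : Option (Int × List Int)) (p : Int × List Int) : Option (Int × List Int) :=
  match o with
  | none => some p
  | some cur => some (pvPickMax cur p)

-- correspondence: an A-candidate (sum, slice) vs a B-descriptor (sum, start, stop)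
def pvRel (arr : List Int) (p : Int × List Int) (c : Int × Int × Int) : Prop :=
  p.1 = c.1 ∧ p.2 = PySem.List.slice arr (some c.2.1) (some c.2.2)

def pvRelO (arr : List Int) : Option (Int × List Int) → Option (Int × Int × Int) → Prop
  | none, none => True
  | some p, some c => pvRel arr p c
  | _, _ => False

-- spec of B's prefix-sum list
def pvScan (a : Int) : List Int → List Int
  | [] => [a]
  | v :: t => a :: pvScan (a + v) t

theorem pv_beq_comm (a b : Int) : (a == b) = (b == a) := by
  by_cases h : a = b <;> simp [h]; omega

theorem pv_step_corr (arr : List Int) (o1 : Option (Int × List Int))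
    (o2 : Option (Int × Int × Int)) (p : Int × List Int) (c : Int × Int × Int)
    (ho : pvRelO arr o1 o2) (hp : pvRel arr p c) :
    pvRelO arr (pvStepA o1 p) (pvStep arr o2 c) := by
  cases o1 with
  | none =>
    cases o2 with
    | none => exact hp
    | some b => exact ho.elim
  | some cur =>
    cases o2 with
    | none => exact ho.elim
    | some b =>
      obtain ⟨h1, h2⟩ := ho
      obtain ⟨h3, h4⟩ := hp
      simp only [pvStepA, pvStep, pvPickMax, h1, h2, h3, h4, pv_beq_comm b.1 c.1]
      split
      · exact ⟨h3, h4⟩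
      · exact ⟨h1, h2⟩

theorem pv_fold_corr (arr : List Int) (la : List (Int × List Int))
    (lb : List (Int × Int × Int)) (o1 : Option (Int × List Int))
    (o2 : Option (Int × Int × Int)) (h : List.Forall₂ (pvRel arr) la lb)
    (ho : pvRelO arr o1 o2) :
    pvRelO arr (la.foldl pvStepA o1) (lb.foldl (pvStep arr) o2) := by
  induction h generalizing o1 o2 with
  | nil => exact ho
  | cons hp _ ih => exact ih _ _ (pv_step_corr arr _ _ _ _ ho hp)

theorem pv_foldA_some (t : List (Int × List Int)) (h : Int × List Int) :
    t.foldl pvStepA (some h) = some (t.foldl pvPickMax h) := by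
  induction t generalizing h with
  | nil => rfl
  | cons a t ih => simpa [pvStepA] using ih (pvPickMax h a)

theorem pv_matchA (l : List (Int × List Int)) :
    (match l with
     | [] => ([] : List Int)
     | h :: t => (t.foldl pvPickMax h).2) =
    (match l.foldl pvStepA none with
     | none => ([] : List Int)
     | some p => p.2) := by
  cases l with
  | nil => rfl
  | cons h t => simp [pvStepA, pv_foldA_some]

theorem pv_foldB_flat (arr : List Int) (c1 c2 : Int → Int × Int × Int)
    (l : List Int) (o : Option (Int × Int × Int)) :
    l.foldl (fun b x => pvStep arr (pvStep arr b (c1 x)) (c2 x)) o =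
    (l.flatMap (fun x => [c1 x, c2 x])).foldl (pvStep arr) o := by
  induction l generalizing o with
  | nil => rfl
  | cons a t ih => simp [List.flatMap_cons, ih]

theorem pv_flatMap_forall₂ {α β γ : Type} (r : β → γ → Prop) (f : α → List β)
    (g : α → List γ) (l : List α) (h : ∀ x ∈ l, List.Forall₂ r (f x) (g x)) :
    List.Forall₂ r (l.flatMap f) (l.flatMap g) := by
  induction l with
  | nil => simp
  | cons a t ih =>
    simp only [List.flatMap_cons]
    exact List.rel_append (h a (by simp)) (ih fun x hx => h x (by simp [hx]))

theorem pv_getLast!_concat (init : List Int) (a : Int) : (init ++ [a]).getLast! = a := by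
  induction init with
  | nil => rfl
  | cons b t ih => simp [List.getLast!]

theorem pv_pre_scan (l : List Int) (init : List Int) (a : Int) :
    l.foldl (fun acc v => acc ++ [acc.getLast! + v]) (init ++ [a]) =
    init ++ pvScan a l := by
  induction l generalizing init a with
  | nil => simp [pvScan]
  | cons v t ih =>
    simp only [List.foldl_cons, pvScan, pv_getLast!_concat, List.append_assoc]
    have := ih (init ++ [a]) (a + v)
    rw [List.append_assoc] at this
    simpa using this

theorem pv_pre_eq (arr : List Int) :
    arr.foldl (fun acc v => acc ++ [acc.getLast! + v]) [0] = pvScan 0 arr := by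
  have := pv_pre_scan arr [] 0
  simpa using this

theorem pv_scan_getD (l : List Int) (a : Int) (k : Nat) (hk : k ≤ l.length) :
    (pvScan a l).getD k 0 = a + (l.take k).sum := by
  induction l generalizing a k with
  | nil =>
    have : k = 0 := by simpa using hk
    subst this; simp [pvScan]
  | cons v t ih =>
    cases k with
    | zero => simp [pvScan]
    | succ k =>
      simp only [pvScan, List.getD_cons_succ, List.take_succ_cons, List.sum_cons]
      rw [ih (a + v) k (by simpa using hk)]
      ring

theorem pv_finish (arr : List Int) (oA : Option (Int × List Int))
    (oB : Option (Int × Int × Int)) :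
    pvRelO arr oA oB →
    (match oA with | none => ([] : List Int) | some p => p.2) =
    (match oB with
     | none => ([] : List Int)
     | some b => PySem.List.slice arr (some b.2.1) (some b.2.2)) := by
  cases oA <;> cases oB <;> intro h
  · rfl
  · exact h.elim
  · exact h.elim
  · exact h.2

theorem pv_main (arr : List Int) : exercise_15 arr = exercise_15_alt arr := by
  unfold exercise_15 exercise_15_alt
  dsimp only
  rw [pv_matchA, pv_pre_eq, PySem.List.foldl_append_eq_flatMap, List.nil_append, pv_foldB_flat]
  have hgetD : ∀ k : Nat, k ≤ arr.length →
      PySem.List.pyGetD (pvScan 0 arr) (k : Int) 0 = (arr.take k).sum := by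
    intro k hk
    rw [PySem.List.pyGetD_natCast]
    simpa using pv_scan_getD arr 0 k hk
  have htotal : PySem.List.pyGetD (pvScan 0 arr) (arr.length : Int) 0 = arr.sum := by
    rw [hgetD arr.length (le_refl _)]; simp
  have hcorr : List.Forall₂ (pvRel arr)
      ((PySem.List.pyRange 1 (arr.length : Int) 1).flatMap (fun x =>
        [((PySem.List.slice arr (some x) none).sum, PySem.List.slice arr (some x) none),
         ((PySem.List.slice arr none (some (-x))).sum, PySem.List.slice arr none (some (-x)))]))
      ((PySem.List.pyRange 1 (arr.length : Int) 1).flatMap (fun x =>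
        [(PySem.List.pyGetD (pvScan 0 arr) (arr.length : Int) 0 -
            PySem.List.pyGetD (pvScan 0 arr) x 0, x, (arr.length : Int)),
         (PySem.List.pyGetD (pvScan 0 arr) ((arr.length : Int) - x) 0, (0 : Int),
            (arr.length : Int) - x)])) := by
    apply pv_flatMap_forall₂
    intro x hx
    have hx' := (PySem.List.mem_pyRange_one (a := 1) (b := (arr.length : Int)) (x := x)).1 hx
    obtain ⟨hx1, hx2⟩ := hx'
    have hxt : x = ((x.toNat : Nat) : Int) := by omega
    have hxlen : x.toNat ≤ arr.length := by omega
    have hsuf : PySem.List.slice arr (some x) none =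
        PySem.List.slice arr (some x) (some (arr.length : Int)) := by
      rw [PySem.List.slice_from arr (by omega), PySem.List.slice_of_nonneg arr (by omega) (by omega) (by omega) (by omega)]
      rw [List.take_of_length_le]
      simp only [List.length_drop]; omega
    have hsufsum : (PySem.List.slice arr (some x) none).sum =
        PySem.List.pyGetD (pvScan 0 arr) (arr.length : Int) 0 -
          PySem.List.pyGetD (pvScan 0 arr) x 0 := by
      rw [htotal, PySem.List.slice_from arr (by omega), hxt, hgetD x.toNat hxlen]
      simp only [Int.toNat_natCast]
      have := List.sum_take_add_sum_drop arr x.toNat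
      omega
    have hpref : PySem.List.slice arr none (some (-x)) =
        PySem.List.slice arr (some 0) (some ((arr.length : Int) - x)) := by
      rw [hxt, PySem.List.slice_to_neg_natCast arr x.toNat (by omega)]
      simp only [PySem.List.slice_zero_start]
      rw [PySem.List.slice_to arr (by omega)]
      congr 1; omega
    have hprefsum : (PySem.List.slice arr none (some (-x))).sum =
        PySem.List.pyGetD (pvScan 0 arr) ((arr.length : Int) - x) 0 := by
      rw [hpref]
      simp only [PySem.List.slice_zero_start]
      rw [PySem.List.slice_to arr (by omega)]
      have h1 : (arr.length : Int) - x = ((((arr.length : Int) - x).toNat : Nat) : Int) := by omega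
      rw [h1, hgetD ((arr.length : Int) - x).toNat (by omega)]
      simp only [Int.toNat_natCast]
    exact List.Forall₂.cons ⟨hsufsum, hsuf⟩
      (List.Forall₂.cons ⟨hprefsum, hpref⟩ List.Forall₂.nil)
  have hrel := pv_fold_corr arr _ _ none none hcorr trivial
  exact pv_finish arr _ _ hrel

-- ===== VERDICT (by name: the statement is the Claim_ definition above) =====
theorem exercise_15_spec : Claim_equal_exercise_15 := by
  intro arr _ _
  exact pv_main arr
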